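-- pv_equiv track=rewrite | github.com/brianchiang-tw/HackerRank | Python/Sets/No Idea/no_idea.py | calc_happiness
-- ===== SOURCE A (Python) =====
-- from typing import List, Set
--
-- def calc_happiness( nums: List, set_a:Set, set_b:Set)-> int:
--
--
--     score_of_happiness = 0
--
--     for x in nums:
--
--         if x in set_a:
--             score_of_happiness += 1
--
--         if x in set_b:
--             score_of_happiness -= 1
--
--     return score_of_happiness
-- ===== SOURCE B (Python) =====
-- def calc_happiness(nums, set_a, set_b):
--     freq = {}
--     for x in nums:
--         freq[x] = freq.get(x, 0) + 1
--     sa = set(set_a)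
--     sb = set(set_b)
--     gain = sum(c for x, c in freq.items() if x in sa)
--     loss = sum(c for x, c in freq.items() if x in sb)
--     return gain - loss
-- ===== Notes on version B (the rewrite author's own statement) =====
-- stated objective: alternative
-- what changed: B builds a frequency table of nums in one pass and then computes the score over the distinct elements weighted by their multiplicities (sum of counts hitting set_a minus sum of counts hitting set_b), instead of A's single per-occurrence +1/-1 accumulation loop.
import Mathlib
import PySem

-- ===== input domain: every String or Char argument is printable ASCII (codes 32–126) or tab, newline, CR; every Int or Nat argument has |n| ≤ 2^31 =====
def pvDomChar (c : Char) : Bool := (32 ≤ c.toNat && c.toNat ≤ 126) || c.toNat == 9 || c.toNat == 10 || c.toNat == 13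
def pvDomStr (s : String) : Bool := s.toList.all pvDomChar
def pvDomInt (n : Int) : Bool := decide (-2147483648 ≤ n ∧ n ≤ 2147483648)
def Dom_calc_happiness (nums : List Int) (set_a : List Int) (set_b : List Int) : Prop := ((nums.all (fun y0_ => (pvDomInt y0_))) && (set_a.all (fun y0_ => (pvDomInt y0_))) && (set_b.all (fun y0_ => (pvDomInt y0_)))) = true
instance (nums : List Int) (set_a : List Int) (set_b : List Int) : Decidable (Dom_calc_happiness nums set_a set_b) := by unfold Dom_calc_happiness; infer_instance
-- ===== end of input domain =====

-- ===== PORT A =====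
-- A: one pass over nums, +1 per element in set_a, -1 per element in set_b.
def calc_happiness (nums : List Int) (set_a : List Int) (set_b : List Int) : Int :=
  nums.foldl (fun score_of_happiness x =>
    let score_of_happiness :=
      if set_a.contains x then score_of_happiness + 1 else score_of_happiness
    if set_b.contains x then score_of_happiness - 1 else score_of_happiness) 0

-- ===== PORT B =====
-- B: build a frequency table, then sum counts over the distinct keys hitting each set.
def calc_happiness_alt (nums : List Int) (set_a : List Int) (set_b : List Int) : Int :=
  let freq := nums.foldl (fun d x => d.insert x (d.getD x 0 + 1)) PySem.Dict.empty
  let sa := PySem.Set.ofList set_a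
  let sb := PySem.Set.ofList set_b
  let gain := ((freq.items.filter (fun p => sa.contains p.1)).map (fun p => p.2)).sum
  let loss := ((freq.items.filter (fun p => sb.contains p.1)).map (fun p => p.2)).sum
  gain - loss

-- ===== PRECONDITION & SPEC =====
def Spec_calc_happiness (nums : List Int) (set_a : List Int) (set_b : List Int) (out : Int) : Prop := out = calc_happiness_alt nums set_a set_b
instance (nums : List Int) (set_a : List Int) (set_b : List Int) (out : Int) : Decidable (Spec_calc_happiness nums set_a set_b out) := by unfold Spec_calc_happiness; infer_instance

-- ===== CLAIM (what is proved, stated in full; the proofs are below) =====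
def Claim_equal_calc_happiness : Prop := ∀ (nums : List Int) (set_a : List Int) (set_b : List Int), Dom_calc_happiness nums set_a set_b → Spec_calc_happiness nums set_a set_b (calc_happiness nums set_a set_b)

-- ===== LEMMAS AND PROOFS =====

-- A's fold computes countP(set_a) - countP(set_b).
theorem calc_happiness_foldl (nums : List Int) (set_a : List Int) (set_b : List Int) (acc : Int) :
    nums.foldl (fun s x =>
      let s := if set_a.contains x then s + 1 else s
      if set_b.contains x then s - 1 else s) acc
      = acc + (nums.countP (fun x => set_a.contains x) : Int)
            - (nums.countP (fun x => set_b.contains x) : Int) := by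
  induction nums generalizing acc with
  | nil => simp
  | cons y ys ih =>
    simp only [List.foldl_cons, List.countP_cons, ih]
    split_ifs <;> simp_all <;> omega

-- countP of a conjunction with equality-to-k collapses to count k.
theorem countP_eq_and (nums : List Int) (k : Int) (p : Int → Bool) :
    nums.countP (fun x => (x == k) && p x) = if p k then nums.count k else 0 := by
  by_cases hp : p k
  · rw [if_pos hp, List.count]
    apply List.countP_congr
    intro x _
    constructor <;> intro h <;> simp_all
  · rw [if_neg hp]
    rw [List.countP_eq_zero]
    intro x _
    simp only [Bool.and_eq_true, beq_iff_eq]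
    rintro ⟨rfl, h⟩
    exact hp h

-- countP splits over membership in k :: rest when k ∉ rest.
theorem countP_mem_cons (nums rest : List Int) (k : Int) (p : Int → Bool) (hk : k ∉ rest) :
    nums.countP (fun x => decide (x ∈ (k :: rest)) && p x)
      = nums.countP (fun x => (x == k) && p x)
        + nums.countP (fun x => decide (x ∈ rest) && p x) := by
  induction nums with
  | nil => simp
  | cons y ys ih =>
    simp only [List.countP_cons, ih]
    by_cases hy : y = k
    · subst hy
      have hnr : y ∉ rest := hk
      simp [hnr]
      omega
    · simp [hy]
      by_cases hm : y ∈ rest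
      · simp [hm]
        omega
      · simp [hm]

-- summing counts over a nodup key list equals countP of (membership ∧ p).
theorem sum_counts (nums : List Int) (u : List Int) (p : Int → Bool) (hu : u.Nodup) :
    ((u.filter p).map (fun k => (nums.count k : Int))).sum
      = (nums.countP (fun x => decide (x ∈ u) && p x) : Int) := by
  induction u with
  | nil => simp
  | cons k rest ih =>
    have hk : k ∉ rest := (List.nodup_cons.mp hu).1
    have hrest := ih (List.nodup_cons.mp hu).2
    rw [countP_mem_cons nums rest k p hk]
    by_cases hp : p k
    · simp only [List.filter_cons, if_pos, List.map_cons, List.sum_cons, hrest,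
        countP_eq_and, hp]
      push_cast
      ring
    · simp only [List.filter_cons, hp, Bool.false_eq_true, if_false, hrest,
        countP_eq_and]
      push_cast
      ring

-- the counter-items sum over keys hitting s equals the per-occurrence countP.
theorem items_sum (nums s : List Int) :
    (((PySem.Dict.counter nums).items.filter
        (fun p => (PySem.Set.ofList s).contains p.1)).map (fun p => p.2)).sum
      = (nums.countP (fun x => s.contains x) : Int) := by
  rw [PySem.Dict.items_counter]
  rw [List.filter_map, List.map_map]
  have h1 : ((PySem.Set.ofList nums).filter
        ((fun p => (PySem.Set.ofList s).contains p.1) ∘ (fun k => (k, (nums.count k : Int))))).map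
        ((fun (p : Int × Int) => p.2) ∘ (fun k => (k, (nums.count k : Int))))
      = ((PySem.Set.ofList nums).filter (fun k => (PySem.Set.ofList s).contains k)).map
        (fun k => (nums.count k : Int)) := by
    simp [Function.comp_def]
  rw [h1, sum_counts nums _ _ (PySem.Set.nodup_ofList nums)]
  apply congrArg
  apply List.countP_congr
  intro x hx
  have hmem : x ∈ PySem.Set.ofList nums := (PySem.Set.mem_ofList nums x).mpr hx
  simp only [Bool.and_eq_true, decide_eq_true_eq, PySem.Set.contains_eq_listContains,
    List.contains_eq_mem, PySem.Set.mem_ofList]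
  tauto

-- ===== VERDICT (by name: the statement is the Claim_ definition above) =====
theorem calc_happiness_spec : Claim_equal_calc_happiness := by
  intro nums set_a set_b _
  show calc_happiness nums set_a set_b = calc_happiness_alt nums set_a set_b
  unfold calc_happiness calc_happiness_alt
  simp only [PySem.Dict.foldl_insert_getD_add_one_eq_counter]
  rw [calc_happiness_foldl, items_sum nums set_a, items_sum nums set_b]
  ring
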